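-- pv_equiv track=rewrite | github.com/atomhb/Auto_Update_Sub | update_subs.py | ensure_unique_proxy_names
-- ===== SOURCE A (Python) =====
-- def ensure_unique_proxy_names(nodes):
--     name_counts = {}
--     for node in nodes:
--         name = node['name']
--         if name in name_counts:
--             name_counts[name] += 1
--             node['name'] = f"{name}_{name_counts[name]}"
--         else:
--             name_counts[name] = 0 # Mark as seen
--     return nodes
-- ===== SOURCE B (Python) =====
-- def ensure_unique_proxy_names(nodes):
--     groups = {}
--     for idx, node in enumerate(nodes):
--         groups.setdefault(node['name'], []).append(idx)
--     for name, idxs in groups.items():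
--         for j, idx in enumerate(idxs[1:], 1):
--             nodes[idx]['name'] = f"{name}_{j}"
--     return nodes
-- ===== Notes on version B (the rewrite author's own statement) =====
-- stated objective: alternative
-- what changed: Replaces A's single stateful scan with a running name_counts dict by a two-phase index-then-regroup strategy: first build a dict mapping each name to the list of positions of the nodes bearing it, then rename, per group, every position after the first with its ordinal as suffix.
import Mathlib
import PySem

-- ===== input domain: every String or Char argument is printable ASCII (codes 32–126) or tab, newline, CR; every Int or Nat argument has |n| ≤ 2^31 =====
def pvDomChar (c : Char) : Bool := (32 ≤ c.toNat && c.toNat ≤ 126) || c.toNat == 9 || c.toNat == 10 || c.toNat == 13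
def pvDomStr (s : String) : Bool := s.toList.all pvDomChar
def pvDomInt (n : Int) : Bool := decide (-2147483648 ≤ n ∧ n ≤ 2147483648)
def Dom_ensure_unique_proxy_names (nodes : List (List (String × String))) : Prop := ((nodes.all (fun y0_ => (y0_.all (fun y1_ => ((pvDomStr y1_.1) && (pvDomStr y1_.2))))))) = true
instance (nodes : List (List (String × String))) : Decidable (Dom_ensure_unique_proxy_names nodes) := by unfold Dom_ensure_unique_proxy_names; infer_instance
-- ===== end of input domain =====

-- B replaces A's single scan with a running name_counts dict by a two-phase group-by
-- strategy: index every name to its list of node positions, then rename the tail of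
-- each group; return-value equivalence (both Pythons mutate the node dicts in place
-- the same way and return the same list object).

-- node['name']  (the KeyError case, node without a 'name' key, is excluded by Pre_)
def pvNm (node : List (String × String)) : String :=
  ((PySem.Dict.mk node).get? "name").getD ""

-- node['name'] = f"{name}_{j}"  (in-place overwrite of the 'name' entry)
def pvRen (node : List (String × String)) (name : String) (j : Int) : List (String × String) :=
  ((PySem.Dict.mk node).insert "name" (name ++ "_" ++ PySem.Int.toStr j)).items

-- ===== PORT A =====
-- the 'for node in nodes' loop with the running name_counts dict
def pvGoA (counts : PySem.Dict String Int) : List (List (String × String)) → List (List (String × String))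
  | [] => []
  | node :: rest =>
    let name := pvNm node
    match PySem.Dict.get? counts name with
    | some c => pvRen node name (c + 1) :: pvGoA (counts.insert name (c + 1)) rest
    | none => node :: pvGoA (counts.insert name 0) rest

def ensure_unique_proxy_names (nodes : List (List (String × String))) : List (List (String × String)) :=
  pvGoA PySem.Dict.empty nodes

-- ===== PORT B =====
-- first pass: groups.setdefault(node['name'], []).append(idx)  over enumerate(nodes)
def pvGroups (nodes : List (List (String × String))) : PySem.Dict String (List Int) :=
  (PySem.List.enumerate nodes 0).foldl
    (fun d p => d.modify (pvNm p.2) [] (· ++ [p.1])) PySem.Dict.empty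

-- second pass, one group: for j, idx in enumerate(idxs[1:], 1): nodes[idx]['name'] = f"{name}_{j}"
def pvRenamePass (acc : List (List (String × String))) (name : String) (idxs : List Int) :
    List (List (String × String)) :=
  (PySem.List.enumerate (PySem.List.slice idxs (some 1) none) 1).foldl
    (fun a p => PySem.List.pySetD a p.2 (pvRen (PySem.List.pyGetD a p.2 []) name p.1)) acc

def ensure_unique_proxy_names_alt (nodes : List (List (String × String))) : List (List (String × String)) :=
  (pvGroups nodes).items.foldl (fun acc pr => pvRenamePass acc pr.1 pr.2) nodes

-- ===== PRECONDITION & SPEC =====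
-- A (and B) raise KeyError on a node without a 'name' key; exactly those inputs are excluded.
def Pre_ensure_unique_proxy_names (nodes : List (List (String × String))) : Prop :=
  ∀ node ∈ nodes, "name" ∈ node.map Prod.fst
instance (nodes : List (List (String × String))) : Decidable (Pre_ensure_unique_proxy_names nodes) := by unfold Pre_ensure_unique_proxy_names; infer_instance
def pvWitness_ensure_unique_proxy_names : (List (List (String × String))) :=
  [[("name", "a")], [("name", "b")], [("name", "a")]]

def Spec_ensure_unique_proxy_names (nodes : List (List (String × String))) (out : List (List (String × String))) : Prop := out = ensure_unique_proxy_names_alt nodes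
instance (nodes : List (List (String × String))) (out : List (List (String × String))) : Decidable (Spec_ensure_unique_proxy_names nodes out) := by unfold Spec_ensure_unique_proxy_names; infer_instance

-- ===== CLAIM (what is proved, stated in full; the proofs are below) =====
def Claim_equal_ensure_unique_proxy_names : Prop := ∀ (nodes : List (List (String × String))), Dom_ensure_unique_proxy_names nodes → Pre_ensure_unique_proxy_names nodes → Spec_ensure_unique_proxy_names nodes (ensure_unique_proxy_names nodes)

-- ===== LEMMAS AND PROOFS =====

-- common middle form of A's scan: f n = how many times n has occurred so far
def pvSpecGo (f : String → Nat) : List (List (String × String)) → List (List (String × String))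
  | [] => []
  | node :: rest =>
    let name := pvNm node
    (if f name = 0 then node else pvRen node name (f name : Int))
      :: pvSpecGo (fun n => if n = name then f n + 1 else f n) rest

-- indexed form: the k-th output node is renamed by the count of its name in the preceding prefix
def pvIdx (names : List String) (i : Nat) : List (List (String × String)) → List (List (String × String))
  | [] => []
  | node :: rest =>
    let name := names.getD i ""
    let j := (names.take i).count name
    (if j = 0 then node else pvRen node name (j : Int)) :: pvIdx names (i + 1) rest

theorem pvGoA_eq (l : List (List (String × String))) :
    ∀ (counts : PySem.Dict String Int) (f : String → Nat),
      (∀ n, counts.get? n = if f n = 0 then none else some ((f n : Int) - 1)) →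
      pvGoA counts l = pvSpecGo f l := by
  induction l with
  | nil => intro counts f _; rfl
  | cons node rest ih =>
    intro counts f h
    simp only [pvGoA, pvSpecGo]
    set name := pvNm node with hnm
    by_cases h0 : f name = 0
    · rw [h name, if_pos h0, if_pos h0]
      dsimp only
      congr 1
      apply ih
      intro n
      rw [PySem.Dict.get?_insert]
      by_cases hn : n = name
      · simp [hn, h0]
      · simp [hn, h n]
    · rw [h name, if_neg h0, if_neg h0]
      dsimp only
      have hc : ((f name : Int) - 1) + 1 = ((f name : Nat) : Int) := by omega
      rw [hc]
      congr 1
      apply ih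
      intro n
      rw [PySem.Dict.get?_insert]
      by_cases hn : n = name
      · subst hn
        simp only [if_true]
        rw [if_neg (show f name + 1 ≠ 0 by omega)]
        congr 1
        push_cast
        omega
      · simp [hn, h n]

theorem pvIdx_eq (l : List (List (String × String))) :
    ∀ (pre : List String),
      pvIdx (pre ++ l.map pvNm) pre.length l = pvSpecGo (fun n => pre.count n) l := by
  induction l with
  | nil => intro pre; rfl
  | cons node rest ih =>
    intro pre
    simp only [pvIdx, pvSpecGo, List.map_cons]
    have hget : (pre ++ pvNm node :: rest.map pvNm).getD pre.length "" = pvNm node := by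
      rw [List.getD_eq_getElem?_getD, List.getElem?_append_right (le_refl _)]
      simp
    have htake : (pre ++ pvNm node :: rest.map pvNm).take pre.length = pre := by
      rw [List.take_append_of_le_length (le_refl _), List.take_length]
    rw [hget, htake]
    congr 1
    have hassoc : pre ++ pvNm node :: rest.map pvNm = (pre ++ [pvNm node]) ++ rest.map pvNm := by
      simp
    have hlen : pre.length + 1 = (pre ++ [pvNm node]).length := by simp
    rw [hassoc, hlen, ih (pre ++ [pvNm node])]
    congr 1
    funext n
    by_cases hn : n = pvNm node
    · simp [hn, List.count_append]
    · simp [hn, List.count_append, List.count_cons]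
      intro hh
      exact hn hh.symm

theorem pvA_eq_idx (nodes : List (List (String × String))) :
    ensure_unique_proxy_names nodes = pvIdx (nodes.map pvNm) 0 nodes := by
  unfold ensure_unique_proxy_names
  have hA := pvGoA_eq nodes PySem.Dict.empty (fun _ => 0)
    (by intro n; simp [PySem.Dict.get?_empty])
  have hB := pvIdx_eq nodes []
  simp only [List.nil_append, List.length_nil] at hB
  rw [hA, hB]
  rfl

-- the k-th output node of the indexed form
theorem pvIdx_getElem? (names : List String) :
    ∀ (l : List (List (String × String))) (i k : Nat),
      (pvIdx names i l)[k]? = (l[k]?).map (fun node =>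
        let name := names.getD (i + k) ""
        let j := (names.take (i + k)).count name
        if j = 0 then node else pvRen node name (j : Int)) := by
  intro l
  induction l with
  | nil => intro i k; simp [pvIdx]
  | cons node rest ih =>
    intro i k
    cases k with
    | zero => simp [pvIdx]
    | succ k' =>
      simp only [pvIdx, List.getElem?_cons_succ]
      rw [ih (i + 1) k']
      simp only [show i + 1 + k' = i + (k' + 1) from by omega]

-- ---- B-side: the grouping dict ----

-- indices (from start s) of the nodes named `name`
def pvGrp (l : List (List (String × String))) (s : Int) (name : String) : List Int :=
  ((PySem.List.enumerate l s).filter (fun p => pvNm p.2 == name)).map (·.1)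

theorem pvGroups_getD (nodes : List (List (String × String))) (n : String) :
    (pvGroups nodes).getD n [] = pvGrp nodes 0 n := by
  unfold pvGroups pvGrp
  rw [← List.foldl_map (f := fun p : Int × List (String × String) => (pvNm p.2, p.1))
    (g := fun (d : PySem.Dict String (List Int)) (q : String × Int) => d.modify q.1 [] (· ++ [q.2]))]
  rw [PySem.Dict.getD_foldl_modify_append]
  simp [List.filter_map, List.map_map, Function.comp_def]

theorem pvGroups_keys (nodes : List (List (String × String))) :
    (pvGroups nodes).keys = PySem.Set.ofList (nodes.map pvNm) := by
  unfold pvGroups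
  rw [PySem.Dict.keys_foldl_modify_key]
  have hm : (PySem.List.enumerate nodes 0).map (fun p => pvNm p.2) = nodes.map pvNm := by
    rw [show (fun p : Int × List (String × String) => pvNm p.2) = pvNm ∘ (·.2) from rfl,
      ← List.map_map, PySem.List.map_snd_enumerate]
  rw [hm, PySem.Dict.keys_empty, PySem.Set.update_nil_left]

theorem pvGroups_nodup (nodes : List (List (String × String))) :
    (pvGroups nodes).keys.Nodup := by
  unfold pvGroups
  exact PySem.Dict.nodup_keys_foldl_modify_key _ _ _ _ _ PySem.Dict.nodup_keys_empty

theorem pvGroups_items (nodes : List (List (String × String))) :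
    (pvGroups nodes).items =
      (PySem.Set.ofList (nodes.map pvNm)).map (fun n => (n, pvGrp nodes 0 n)) := by
  rw [PySem.Dict.items_eq_map_keys _ (pvGroups_nodup nodes) []]
  rw [pvGroups_keys]
  exact List.map_congr_left (fun n _ => by rw [pvGroups_getD])

-- ---- pvGrp facts ----

theorem pvGrp_mem_iff (l : List (List (String × String))) (s x : Int) (n : String) :
    x ∈ pvGrp l s n ↔ ∃ (j : Nat), ∃ (h : j < l.length), x = s + j ∧ pvNm l[j] = n := by
  simp only [pvGrp, List.mem_map, List.mem_filter, PySem.List.mem_enumerate_iff]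
  constructor
  · rintro ⟨p, ⟨⟨j, hj, rfl⟩, hn⟩, rfl⟩
    exact ⟨j, hj, rfl, by simpa using hn⟩
  · rintro ⟨j, hj, rfl, hn⟩
    exact ⟨(s + j, l[j]), ⟨⟨j, hj, rfl⟩, by simpa using hn⟩, rfl⟩

theorem pvGrp_append (l1 l2 : List (List (String × String))) (s : Int) (n : String) :
    pvGrp (l1 ++ l2) s n = pvGrp l1 s n ++ pvGrp l2 (s + l1.length) n := by
  simp [pvGrp, PySem.List.enumerate_append, List.filter_append]

theorem pvGrp_cons (node : List (String × String)) (l : List (List (String × String))) (s : Int) (n : String) :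
    pvGrp (node :: l) s n =
      (if pvNm node == n then [s] else []) ++ pvGrp l (s + 1) n := by
  simp only [pvGrp, PySem.List.enumerate_cons, List.filter_cons]
  split_ifs with h
  · simp
  · simp

theorem pvGrp_length (n : String) :
    ∀ (l : List (List (String × String))) (s : Int),
      (pvGrp l s n).length = (l.map pvNm).count n := by
  intro l
  induction l with
  | nil => intro s; simp [pvGrp]
  | cons node rest ih =>
    intro s
    rw [pvGrp_cons]
    by_cases h : pvNm node = n
    · simp [h, ih]
    · simp [h, ih]

theorem pvGrp_nodup (l : List (List (String × String))) (s : Int) (n : String) :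
    (pvGrp l s n).Nodup := by
  have h1 : ((PySem.List.enumerate l s).filter (fun p => pvNm p.2 == n)).Pairwise (fun p q => p.1 < q.1) :=
    List.Pairwise.sublist List.filter_sublist (PySem.List.pairwise_lt_enumerate l s)
  have h2 : (pvGrp l s n).Pairwise (· < ·) := by
    unfold pvGrp
    exact (List.pairwise_map).mpr h1
  exact h2.imp (fun h => Int.ne_of_lt h)

-- ---- the inner rename fold, pointwise ----

theorem pvFold_length (name : String) :
    ∀ (qs : List (Int × Int)) (acc : List (List (String × String))),
      (qs.foldl (fun a p => PySem.List.pySetD a p.2 (pvRen (PySem.List.pyGetD a p.2 []) name p.1)) acc).length = acc.length := by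
  intro qs
  induction qs with
  | nil => intro acc; rfl
  | cons p rest ih =>
    intro acc
    rw [List.foldl_cons, ih, PySem.List.length_pySetD]

theorem pvFold_notMem (name : String) :
    ∀ (qs : List (Int × Int)) (acc : List (List (String × String))) (k : Nat),
      (∀ p ∈ qs, 0 ≤ p.2) → ((k : Int) ∉ qs.map (·.2)) →
      (qs.foldl (fun a p => PySem.List.pySetD a p.2 (pvRen (PySem.List.pyGetD a p.2 []) name p.1)) acc)[k]? = acc[k]? := by
  intro qs
  induction qs with
  | nil => intro acc k _ _; rfl
  | cons p rest ih =>
    intro acc k h0 hk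
    simp only [List.map_cons, List.mem_cons, not_or] at hk
    rw [List.foldl_cons, ih _ k (fun q hq => h0 q (List.mem_cons_of_mem _ hq)) hk.2]
    have h2 := h0 p (List.mem_cons_self ..)
    have h1 : p.2 ≠ (k : Int) := fun h => hk.1 h.symm
    rw [PySem.List.pySetD_of_nonneg _ _ h2]
    rw [List.getElem?_set_ne (by omega)]

theorem pvFold_mem (name : String) :
    ∀ (qs : List (Int × Int)) (acc : List (List (String × String))) (j : Int) (k : Nat),
      (∀ p ∈ qs, 0 ≤ p.2) → (qs.map (·.2)).Nodup → (j, (k : Int)) ∈ qs → k < acc.length →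
      (qs.foldl (fun a p => PySem.List.pySetD a p.2 (pvRen (PySem.List.pyGetD a p.2 []) name p.1)) acc)[k]? = some (pvRen (acc.getD k []) name j) := by
  intro qs
  induction qs with
  | nil => intro acc j k _ _ hmem _; exact absurd hmem (List.not_mem_nil)
  | cons p rest ih =>
    intro acc j k h0 hnd hmem hk
    simp only [List.map_cons, List.nodup_cons] at hnd
    rcases List.mem_cons.mp hmem with heq | hmem'
    · subst heq
      simp only [List.foldl_cons]
      rw [pvFold_notMem name rest _ k (fun q hq => h0 q (List.mem_cons_of_mem _ hq)) hnd.1]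
      rw [PySem.List.pySetD_natCast, PySem.List.pyGetD_natCast]
      rw [List.getElem?_set_self (by omega)]
    · have hp2 : p.2 ≠ (k : Int) := by
        intro h
        exact hnd.1 (h ▸ (List.mem_map.mpr ⟨(j, (k:Int)), hmem', rfl⟩))
      have hp0 := h0 p (List.mem_cons_self ..)
      simp only [List.foldl_cons]
      rw [PySem.List.pySetD_of_nonneg _ _ hp0]
      rw [ih _ j k (fun q hq => h0 q (List.mem_cons_of_mem _ hq)) hnd.2 hmem'
        (by rw [List.length_set]; exact hk)]
      congr 2
      rw [List.getD_eq_getElem?_getD, List.getD_eq_getElem?_getD, List.getElem?_set_ne (by omega)]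

theorem pvGrp_nonneg (l : List (List (String × String))) (n : String) :
    ∀ x ∈ pvGrp l 0 n, 0 ≤ x := by
  intro x hx
  obtain ⟨j, hj, rfl, -⟩ := (pvGrp_mem_iff l 0 x n).mp hx
  omega

theorem pvRenamePass_length (acc : List (List (String × String))) (name : String) (idxs : List Int) :
    (pvRenamePass acc name idxs).length = acc.length := by
  unfold pvRenamePass
  exact pvFold_length name _ acc

theorem pvRenamePass_other (acc : List (List (String × String))) (name : String) (idxs : List Int)
    (k : Nat) (hpos : ∀ x ∈ idxs, 0 ≤ x) (hk : (k : Int) ∉ idxs.drop 1) :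
    (pvRenamePass acc name idxs)[k]? = acc[k]? := by
  unfold pvRenamePass
  rw [PySem.List.slice_from_one, ← List.drop_one]
  apply pvFold_notMem
  · intro p hp
    have : p.2 ∈ (PySem.List.enumerate (idxs.drop 1) 1).map (·.2) := List.mem_map_of_mem hp
    rw [PySem.List.map_snd_enumerate] at this
    exact hpos _ (List.mem_of_mem_drop this)
  · rw [PySem.List.map_snd_enumerate]
    exact hk

theorem pvRenamePass_own (acc : List (List (String × String))) (name : String)
    (pre post : List Int) (k : Nat)
    (hne : pre ≠ [])
    (hnd : (pre ++ (k : Int) :: post).Nodup)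
    (hpos : ∀ x ∈ pre ++ (k : Int) :: post, 0 ≤ x)
    (hk : k < acc.length) :
    (pvRenamePass acc name (pre ++ (k : Int) :: post))[k]? =
      some (pvRen (acc.getD k []) name (pre.length : Int)) := by
  obtain ⟨p0, pre', rfl⟩ := List.exists_cons_of_ne_nil hne
  unfold pvRenamePass
  rw [PySem.List.slice_from_one, ← List.drop_one]
  have htail : ((p0 :: pre') ++ (k : Int) :: post).drop 1 = pre' ++ (k : Int) :: post := by simp
  rw [htail]
  have hmem : ((1 + (pre'.length : Int)), (k : Int)) ∈
      PySem.List.enumerate (pre' ++ (k : Int) :: post) 1 := by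
    rw [PySem.List.enumerate_append, PySem.List.enumerate_cons]
    exact List.mem_append_right _ (List.mem_cons_self ..)
  have h := pvFold_mem name (PySem.List.enumerate (pre' ++ (k : Int) :: post) 1) acc
      (1 + (pre'.length : Int)) k
      (by
        intro p hp
        have : p.2 ∈ (PySem.List.enumerate (pre' ++ (k : Int) :: post) 1).map (·.2) :=
          List.mem_map_of_mem hp
        rw [PySem.List.map_snd_enumerate] at this
        apply hpos
        rcases List.mem_append.mp this with h' | h'
        · exact List.mem_append_left _ (List.mem_cons_of_mem _ h')
        · exact List.mem_append_right _ h')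
      (by
        rw [PySem.List.map_snd_enumerate]
        have : (pre' ++ (k : Int) :: post).Sublist ((p0 :: pre') ++ (k : Int) :: post) := by
          simp [List.Sublist.cons]
        exact hnd.sublist this)
      hmem hk
  rw [h]
  congr 2
  simp only [List.length_cons]
  push_cast
  omega

theorem pvOuterFold_length (nodes : List (List (String × String))) :
    ∀ (L : List String) (acc : List (List (String × String))),
      (L.foldl (fun acc n => pvRenamePass acc n (pvGrp nodes 0 n)) acc).length = acc.length := by
  intro L
  induction L with
  | nil => intro acc; rfl
  | cons n L ih => intro acc; rw [List.foldl_cons, ih, pvRenamePass_length]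

theorem pvOuterFold_other (nodes : List (List (String × String))) (k : Nat)
    (hk : k < nodes.length) :
    ∀ (L : List String) (acc : List (List (String × String))),
      (∀ n ∈ L, n ≠ pvNm nodes[k]) →
      (L.foldl (fun acc n => pvRenamePass acc n (pvGrp nodes 0 n)) acc)[k]? = acc[k]? := by
  intro L
  induction L with
  | nil => intro acc _; rfl
  | cons n L ih =>
    intro acc hL
    rw [List.foldl_cons, ih _ (fun m hm => hL m (List.mem_cons_of_mem _ hm))]
    apply pvRenamePass_other _ _ _ _ (pvGrp_nonneg nodes n)
    intro hmem
    have hmem' := List.mem_of_mem_drop hmem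
    obtain ⟨j, hj, hkj, hn⟩ := (pvGrp_mem_iff nodes 0 (k : Int) n).mp hmem'
    have : j = k := by omega
    subst this
    exact hL n (List.mem_cons_self ..) hn.symm

theorem pvB_main (nodes : List (List (String × String))) :
    (PySem.Set.ofList (nodes.map pvNm)).foldl
        (fun acc n => pvRenamePass acc n (pvGrp nodes 0 n)) nodes
      = pvIdx (nodes.map pvNm) 0 nodes := by
  apply List.ext_getElem?
  intro k
  rw [pvIdx_getElem?]
  by_cases hk : k < nodes.length
  · -- decompose the key list around this node's name
    have hnm : pvNm nodes[k] ∈ PySem.Set.ofList (nodes.map pvNm) := by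
      rw [PySem.Set.mem_ofList]
      exact List.mem_map_of_mem (List.getElem_mem hk)
    obtain ⟨K1, K2, hKs⟩ := List.append_of_mem hnm
    have hnd := PySem.Set.nodup_ofList (xs := nodes.map pvNm)
    rw [hKs, List.nodup_append] at hnd
    have hK1 : ∀ n ∈ K1, n ≠ pvNm nodes[k] := by
      intro n hn
      exact hnd.2.2 n hn (pvNm nodes[k]) (List.mem_cons_self ..)
    have hK2 : ∀ n ∈ K2, n ≠ pvNm nodes[k] := by
      intro n hn he
      exact (List.nodup_cons.mp hnd.2.1).1 (he ▸ hn)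
    set nm := pvNm nodes[k] with hnmdef
    rw [hKs, List.foldl_append, List.foldl_cons]
    rw [pvOuterFold_other nodes k hk K2 _ hK2]
    -- state of the list after the groups before ours: unchanged at k
    set acc1 := K1.foldl (fun acc n => pvRenamePass acc n (pvGrp nodes 0 n)) nodes with hacc1
    have hlen1 : acc1.length = nodes.length := pvOuterFold_length nodes K1 nodes
    have hat1 : acc1[k]? = some nodes[k] := by
      rw [pvOuterFold_other nodes k hk K1 _ hK1]
      exact List.getElem?_eq_getElem hk
    -- decompose this name's group around position k
    have hdec : nodes = nodes.take k ++ nodes[k] :: nodes.drop (k + 1) := by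
      conv_lhs => rw [← List.take_append_drop k nodes, List.drop_eq_getElem_cons hk]
    have hgrp : pvGrp nodes 0 nm =
        pvGrp (nodes.take k) 0 nm ++ (k : Int) ::
          pvGrp (nodes.drop (k + 1)) ((k : Int) + 1) nm := by
      conv_lhs => rw [hdec]
      rw [pvGrp_append, pvGrp_cons]
      simp [List.length_take, Nat.min_eq_left (le_of_lt hk), ← hnmdef]
    set c := ((nodes.map pvNm).take k).count nm with hc
    have hprelen : (pvGrp (nodes.take k) 0 nm).length = c := by
      rw [pvGrp_length, List.map_take]
    have hnmk : (nodes.map pvNm).getD k "" = nm := by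
      rw [List.getD_eq_getElem?_getD, List.getElem?_map, List.getElem?_eq_getElem hk]
      rfl
    simp only [Nat.zero_add, hnmk, ← hc]
    by_cases hc0 : c = 0
    · -- first occurrence: its group starts with k; nothing is renamed at k
      have hpre : pvGrp (nodes.take k) 0 nm = [] :=
        List.eq_nil_of_length_eq_zero (by rw [hprelen, hc0])
      rw [pvRenamePass_other _ _ _ _ (pvGrp_nonneg nodes _), hat1, hc0]
      · simp [List.getElem?_eq_getElem hk]
      · rw [hgrp, hpre]
        simp only [List.nil_append, List.drop_one, List.tail_cons]
        intro hmem
        obtain ⟨j, hj, hkj, -⟩ := (pvGrp_mem_iff _ _ _ _).mp hmem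
        omega
    · -- later occurrence: k sits after c earlier indices in its group
      have hgd : acc1.getD k [] = nodes[k] := by
        rw [List.getD_eq_getElem?_getD, hat1]
        rfl
      rw [hgrp, pvRenamePass_own acc1 _ _ _ k
          (by intro h; rw [h] at hprelen; simp at hprelen; omega)
          (by rw [← hgrp]; exact pvGrp_nodup nodes 0 _)
          (by rw [← hgrp]; exact pvGrp_nonneg nodes _)
          (by rw [hlen1]; exact hk), hgd, hprelen]
      simp [hc0, List.getElem?_eq_getElem hk]
  · -- past the end: both sides are none
    have h1 : nodes[k]? = none := List.getElem?_eq_none (by omega)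
    rw [h1, Option.map_none]
    exact List.getElem?_eq_none (by rw [pvOuterFold_length]; omega)

-- ===== VERDICT (by name: the statement is the Claim_ definition above) =====
theorem ensure_unique_proxy_names_spec : Claim_equal_ensure_unique_proxy_names := by
  intro nodes _ _
  unfold Spec_ensure_unique_proxy_names ensure_unique_proxy_names_alt
  rw [pvA_eq_idx, pvGroups_items]
  simp only [List.foldl_map]
  exact (pvB_main nodes).symm
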